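-- pv_equiv track=rewrite | github.com/Mostafaalaie/mft-AI-course | week2/ex4.py | orgenize
-- ===== SOURCE A (Python) =====
-- def orgenize(info_list):
--     temp_list = []
--
--     for item in info_list:
--         temp = item.split('-')
--         temp_list.append(temp[0])
--         temp_list.append(temp[1])
--
--     music_list = temp_list[0::2]
--     genre_list = temp_list[1::2]
--     rock_counter = 0
--     metal_counter = 0
--
--     for item in genre_list:
--         if item == "rock":
--             rock_counter +=1
--         elif item == "metal":
--             metal_counter +=1
--         else:
--             pass
--
--     result = [rock_counter, metal_counter]
--
--     return result
-- ===== SOURCE B (Python) =====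
-- def orgenize(info_list):
--     rock_counter = 0
--     metal_counter = 0
--     for item in info_list:
--         genre = item.split('-')[1]
--         if genre == "rock":
--             rock_counter += 1
--         elif genre == "metal":
--             metal_counter += 1
--     return [rock_counter, metal_counter]
-- ===== Notes on version B (the rewrite author's own statement) =====
-- stated objective: simpler
-- what changed: B is a single pass that splits each item and counts parts[1] directly, replacing A's temporary flattened list, the [0::2]/[1::2] slicing and the separate counting loop.
import Mathlib
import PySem

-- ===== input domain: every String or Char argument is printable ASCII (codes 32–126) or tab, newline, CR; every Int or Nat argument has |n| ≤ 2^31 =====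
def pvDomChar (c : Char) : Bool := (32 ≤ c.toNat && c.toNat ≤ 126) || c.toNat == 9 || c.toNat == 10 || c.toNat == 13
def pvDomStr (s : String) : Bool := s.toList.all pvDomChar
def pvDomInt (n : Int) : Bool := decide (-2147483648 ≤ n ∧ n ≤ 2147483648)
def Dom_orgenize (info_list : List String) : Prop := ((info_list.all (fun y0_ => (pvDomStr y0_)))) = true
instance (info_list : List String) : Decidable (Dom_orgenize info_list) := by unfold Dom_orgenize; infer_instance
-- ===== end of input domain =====

-- ===== PORT A =====
-- B is a single pass with two counters; A builds a flattened temp list, slices it, then counts (return values agree).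
def orgenize (info_list : List String) : List Int :=
  let temp_list := info_list.foldl (fun acc item =>
    let temp := (PySem.Str.split? item "-").getD []
    acc ++ [(PySem.List.pyGet? temp 0).getD ""] ++ [(PySem.List.pyGet? temp 1).getD ""]) []
  let _music_list := (PySem.List.slice? temp_list (some 0) none 2).getD []
  let genre_list := (PySem.List.slice? temp_list (some 1) none 2).getD []
  let counters := genre_list.foldl (fun (c : Int × Int) item =>
    if item == "rock" then (c.1 + 1, c.2)
    else if item == "metal" then (c.1, c.2 + 1)
    else c) (0, 0)
  [counters.1, counters.2]

-- ===== PORT B =====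
def orgenize_alt (info_list : List String) : List Int :=
  let counters := info_list.foldl (fun (c : Int × Int) item =>
    let genre := (PySem.List.pyGet? ((PySem.Str.split? item "-").getD []) 1).getD ""
    if genre == "rock" then (c.1 + 1, c.2)
    else if genre == "metal" then (c.1, c.2 + 1)
    else c) (0, 0)
  [counters.1, counters.2]

-- ===== PRECONDITION & SPEC =====
-- Pre_ excludes exactly the inputs where the Python A raises IndexError (an item without a '-'); B raises there too.
def Pre_orgenize (info_list : List String) : Prop :=
  ∀ s ∈ info_list, '-' ∈ s.toList
instance (info_list : List String) : Decidable (Pre_orgenize info_list) := by unfold Pre_orgenize; infer_instance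
def pvWitness_orgenize : List String := ["song1-rock", "song2-metal", "song3-pop"]
def Spec_orgenize (info_list : List String) (out : List Int) : Prop := out = orgenize_alt info_list
instance (info_list : List String) (out : List Int) : Decidable (Spec_orgenize info_list out) := by unfold Spec_orgenize; infer_instance

-- ===== CLAIM (what is proved, stated in full; the proofs are below) =====
def Claim_equal_orgenize : Prop := ∀ (info_list : List String), Dom_orgenize info_list → Pre_orgenize info_list → Spec_orgenize info_list (orgenize info_list)

-- ===== LEMMAS AND PROOFS =====
-- the genre A's temp[1] / B's parts[1] both compute for one item
def pvGenre (item : String) : String :=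
  (PySem.List.pyGet? ((PySem.Str.split? item "-").getD []) 1).getD ""

def pvFirst (item : String) : String :=
  (PySem.List.pyGet? ((PySem.Str.split? item "-").getD []) 0).getD ""

lemma pairGet (l : List String) (k : Nat) :
    (l.flatMap fun x => [pvFirst x, pvGenre x])[2 * k + 1]? = (l.map pvGenre)[k]? := by
  induction l generalizing k with
  | nil => simp
  | cons a l ih =>
    cases k with
    | zero => simp [List.flatMap_cons]
    | succ k =>
      have h : 2 * (k + 1) + 1 = (2 * k + 1) + 1 + 1 := by omega
      simp [List.flatMap_cons, h, ih]

lemma rangeGet (m : List String) :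
    (List.range m.length).filterMap (fun k => m[k]?) = m := by
  induction m with
  | nil => simp
  | cons a m ih =>
    simp [List.range_succ_eq_map, List.filterMap_map, ih]

lemma slice_odd (l : List String) :
    (PySem.List.slice? (l.flatMap fun x => [pvFirst x, pvGenre x]) (some 1) none 2).getD []
      = l.map pvGenre := by
  have hlen : (l.flatMap fun x => [pvFirst x, pvGenre x]).length = 2 * l.length := by
    induction l with
    | nil => simp
    | cons a t ih => simp [List.flatMap_cons, ih]; omega
  cases l with
  | nil => simp [PySem.List.slice?, PySem.List.sliceIndices]
  | cons a t =>
    simp only [PySem.List.slice?, PySem.List.sliceIndices, hlen]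
    norm_num
    have hmin : min (1:Int) (2 * ((t.length:Int) + 1)) = 1 := by omega
    have hc : (if (1:Int) < 2 * ((t.length:Int) + 1) then
        ((2 * ((t.length:Int) + 1) - min 1 (2 * ((t.length:Int) + 1)) + 2 - 1) / 2).toNat else 0)
        = t.length + 1 := by
      rw [if_pos (by omega)]; omega
    rw [hc]
    simp only [hmin]
    have hidx : ∀ k ∈ List.range (t.length + 1),
        (pvFirst a :: pvGenre a :: List.flatMap (fun x => [pvFirst x, pvGenre x]) t)[((1:Int) + 2 * (k:Int)).toNat]?
          = ((a :: t).map pvGenre)[k]? := by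
      intro k _
      have h2 : ((1:Int) + 2 * (k:Int)).toNat = 2 * k + 1 := by omega
      rw [h2]
      simpa [List.flatMap_cons] using pairGet (a :: t) k
    rw [List.filterMap_congr hidx]
    simpa using rangeGet ((a :: t).map pvGenre)

theorem orgenize_eq (info_list : List String) : orgenize info_list = orgenize_alt info_list := by
  unfold orgenize orgenize_alt
  have hflat : info_list.foldl (fun acc item =>
      let temp := (PySem.Str.split? item "-").getD []
      acc ++ [(PySem.List.pyGet? temp 0).getD ""] ++ [(PySem.List.pyGet? temp 1).getD ""]) []
      = info_list.flatMap fun x => [pvFirst x, pvGenre x] := by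
    simp only [List.append_assoc, List.singleton_append]
    exact PySem.List.foldl_append_eq_flatMap _ _ []
  simp only [hflat, slice_odd]
  rw [List.foldl_map]
  rfl

-- ===== VERDICT (by name: the statement is the Claim_ definition above) =====
theorem orgenize_spec : Claim_equal_orgenize := by
  intro info_list _ _
  unfold Spec_orgenize
  exact orgenize_eq info_list
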